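-- pv_equiv track=rewrite | github.com/aditikeertani/capstoneproject | backend/server.py | _infer_extra_block
-- ===== SOURCE A (Python) =====
-- def _infer_extra_block(state_dict):
--     max_idx = -1
--     for key in state_dict.keys():
--         if not (key.startswith("backbone.layers.") and key.endswith("conv.weight")):
--             continue
--         parts = key.split(".")
--         if len(parts) < 4:
--             continue
--         try:
--             idx = int(parts[2])
--         except Exception:
--             continue
--         if idx > max_idx:
--             max_idx = idx
--     return max_idx >= 10
-- ===== SOURCE B (Python) =====
-- _PREFIX = "backbone.layers."
--
--
-- def _layer_hit(key):
--     if key.startswith(_PREFIX) and key.endswith("conv.weight"):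
--         rest = key[len(_PREFIX):]
--         dot = rest.find(".")
--         if dot != -1:
--             try:
--                 return int(rest[:dot]) >= 10
--             except Exception:
--                 pass
--     return False
--
--
-- def _infer_extra_block(state_dict):
--     for key in state_dict.keys():
--         if _layer_hit(key):
--             return True
--     return False
-- ===== Notes on version B (the rewrite author's own statement) =====
-- stated objective: alternative
-- what changed: B parses the layer index by slicing off the fixed prefix and cutting at the first dot of the remainder (find + slice) instead of splitting the whole key into parts, and replaces A's running-maximum-then-threshold fold with an early-exit scan that returns True at the first qualifying key.
import Mathlib
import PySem

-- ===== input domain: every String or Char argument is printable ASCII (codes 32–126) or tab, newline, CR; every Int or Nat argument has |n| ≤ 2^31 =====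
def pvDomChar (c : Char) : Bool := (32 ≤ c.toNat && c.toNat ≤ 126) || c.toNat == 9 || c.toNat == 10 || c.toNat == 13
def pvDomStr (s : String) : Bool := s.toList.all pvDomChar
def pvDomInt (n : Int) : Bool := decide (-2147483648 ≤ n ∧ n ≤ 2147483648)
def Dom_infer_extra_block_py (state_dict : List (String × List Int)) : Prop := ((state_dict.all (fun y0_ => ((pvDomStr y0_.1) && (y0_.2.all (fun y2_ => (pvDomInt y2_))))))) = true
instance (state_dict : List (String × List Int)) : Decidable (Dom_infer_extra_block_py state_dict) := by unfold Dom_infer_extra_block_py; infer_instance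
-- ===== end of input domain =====

-- B parses the index by prefix-slice + find-first-dot instead of a full split, and scans with an early exit instead of A's running maximum (return value only; no mutation involved).

-- ===== PORT A =====
-- loop body of A for one key: update the running maximum max_idx
def pvAStep (m : Int) (key : String) : Int :=
  if !(PySem.Str.startswith key "backbone.layers." && PySem.Str.endswith key "conv.weight") then m
  else
    let parts := (PySem.Str.split? key ".").getD []  -- sep "." ≠ "", so split? is some
    if parts.length < 4 then m
    else
      match parts[2]? >>= PySem.Int.ofStr? with  -- int(parts[2]); none = ValueError, skipped
      | none => m
      | some idx => if idx > m then idx else m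

def infer_extra_block_py (state_dict : List (String × List Int)) : Bool :=
  let max_idx : Int := state_dict.foldl (fun m p => pvAStep m p.1) (-1)
  decide (max_idx ≥ 10)

-- ===== PORT B =====
-- Source B's helper _layer_hit: slice off the 16-char prefix, cut at the first "." of the remainder
def pvHit (key : String) : Bool :=
  if PySem.Str.startswith key "backbone.layers." && PySem.Str.endswith key "conv.weight" then
    let rest := PySem.Str.slice key (some 16) none      -- key[len(_PREFIX):]
    let dot := PySem.Str.find rest "."                  -- rest.find(".")
    if dot ≠ -1 then
      match PySem.Int.ofStr? (PySem.Str.slice rest none (some dot)) with  -- int(rest[:dot]); none = ValueError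
      | some idx => decide (idx ≥ 10)
      | none => false
    else false
  else false

-- Source B's loop: return True at the first hit, False when the keys are exhausted
def infer_extra_block_py_alt (state_dict : List (String × List Int)) : Bool :=
  match state_dict with
  | [] => false
  | p :: rest => if pvHit p.1 then true else infer_extra_block_py_alt rest

-- ===== PRECONDITION & SPEC =====
def Spec_infer_extra_block_py (state_dict : List (String × List Int)) (out : Bool) : Prop := out = infer_extra_block_py_alt state_dict
instance (state_dict : List (String × List Int)) (out : Bool) : Decidable (Spec_infer_extra_block_py state_dict out) := by unfold Spec_infer_extra_block_py; infer_instance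

-- ===== CLAIM (what is proved, stated in full; the proofs are below) =====
def Claim_equal_infer_extra_block_py : Prop := ∀ (state_dict : List (String × List Int)), Dom_infer_extra_block_py state_dict → Spec_infer_extra_block_py state_dict (infer_extra_block_py state_dict)

-- ===== LEMMAS AND PROOFS =====
-- a clean structural model of splitting on '.'
def pvSp : List Char → List (List Char)
  | [] => [[]]
  | c :: l => if c = '.' then [] :: pvSp l else (pvSp l).modifyHead (c :: ·)

theorem pvSp_ne_nil (l : List Char) : pvSp l ≠ [] := by
  induction l with
  | nil => simp [pvSp]
  | cons c l ih =>
    simp only [pvSp]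
    split
    · simp
    · intro h; exact ih (by simpa using congrArg List.length h)

theorem pvSplitOn_go_eq (fuel : Nat) : ∀ (l cur : List Char) (acc : List (List Char)),
    l.length < fuel →
    PySem.Chars.splitOn.go ['.'] fuel l cur acc
      = acc.reverse ++ (pvSp l).modifyHead (fun t => cur.reverse ++ t) := by
  induction fuel with
  | zero => intro l cur acc h; omega
  | succ f ih =>
    intro l cur acc h
    cases l with
    | nil => simp [PySem.Chars.splitOn.go, pvSp, List.modifyHead]
    | cons c rest =>
      by_cases hc : c = '.'
      · subst hc
        rw [PySem.Chars.splitOn.go]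
        simp only [List.isPrefixOf, beq_self_eq_true, Bool.true_and, if_pos]
        rw [show List.drop ['.'].length ('.' :: rest) = rest from rfl,
          ih rest [] (cur.reverse :: acc) (by simpa using Nat.lt_of_succ_lt_succ h)]
        cases hsp : pvSp rest <;> simp [pvSp, hsp, List.modifyHead]
      · rw [PySem.Chars.splitOn.go]
        have hpre : ['.'].isPrefixOf (c :: rest) = false := by
          simp [List.isPrefixOf]; exact fun e => hc e.symm
        simp only [hpre, Bool.false_eq_true, if_false]
        rw [ih rest (c :: cur) acc (by simpa using Nat.lt_of_succ_lt_succ h)]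
        cases hsp : pvSp rest <;> simp [pvSp, hsp, hc, List.modifyHead]

theorem pvSplitOn_eq (l : List Char) : PySem.Chars.splitOn l ['.'] = pvSp l := by
  rw [PySem.Chars.splitOn, pvSplitOn_go_eq (l.length + 1) l [] [] (Nat.lt_succ_self _)]
  cases hsp : pvSp l <;> simp [List.modifyHead]

theorem pvSp_append_no_dot (a b : List Char) (h : '.' ∉ a) :
    pvSp (a ++ b) = (pvSp b).modifyHead (a ++ ·) := by
  induction a with
  | nil =>
    simp only [List.nil_append]
    cases hsp : pvSp b <;> simp [List.modifyHead]
  | cons c a ih =>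
    have hc : c ≠ '.' := fun e => h (e ▸ List.mem_cons_self)
    simp only [List.cons_append, pvSp, if_neg hc, ih (fun m => h (List.mem_cons_of_mem _ m)),
      List.modifyHead_modifyHead]
    rfl

theorem pvSp_pre (r : List Char) :
    pvSp ("backbone.layers.".toList ++ r) = "backbone".toList :: "layers".toList :: pvSp r := by
  have h : "backbone.layers.".toList ++ r
      = "backbone".toList ++ ('.' :: ("layers".toList ++ ('.' :: r))) := rfl
  rw [h, pvSp_append_no_dot _ _ (by decide)]
  show ([] :: pvSp ("layers".toList ++ ('.' :: r))).modifyHead _ = _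
  rw [pvSp_append_no_dot _ _ (by decide)]
  show ([] :: ([] :: pvSp r).modifyHead _).modifyHead _ = _
  simp [List.modifyHead]

-- find's accumulator shifts the result
theorem pvFind_go_nonneg (l : List Char) : ∀ k : Nat,
    PySem.Chars.find.go ['.'] l k = -1 ∨ (k : Int) ≤ PySem.Chars.find.go ['.'] l k := by
  induction l with
  | nil => intro k; rw [PySem.Chars.find.go]; simp
  | cons c rest ih =>
    intro k
    rw [PySem.Chars.find.go]
    split
    · right; simp
    · rcases ih (k + 1) with h | h
      · left; exact h
      · right; refine le_trans ?_ h; push_cast; omega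

theorem pvFind_go_shift (l : List Char) : ∀ k : Nat,
    PySem.Chars.find.go ['.'] l k
      = if PySem.Chars.find.go ['.'] l 0 = -1 then -1 else PySem.Chars.find.go ['.'] l 0 + k := by
  induction l with
  | nil => intro k; rw [PySem.Chars.find.go, PySem.Chars.find.go]; simp
  | cons c rest ih =>
    intro k
    rw [PySem.Chars.find.go]
    conv_rhs => rw [PySem.Chars.find.go]
    split
    · simp
    · rw [ih (k + 1), ih 1]
      rcases pvFind_go_nonneg rest 0 with h | h
      · simp [h]
      · have hne : PySem.Chars.find.go ['.'] rest 0 ≠ -1 := by omega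
        rw [if_neg hne, if_neg hne]
        split_ifs <;> omega

-- joint characterisation of pvSp and find on '.'
theorem pvSp_find (l : List Char) :
    (PySem.Chars.find l ['.'] = -1 ∧ ∃ a, pvSp l = [a]) ∨
    (∃ k : Nat, PySem.Chars.find l ['.'] = (k : Int) ∧ 2 ≤ (pvSp l).length ∧
      (pvSp l).head? = some (l.take k)) := by
  induction l with
  | nil =>
    left
    constructor
    · rw [PySem.Chars.find, PySem.Chars.find.go]; simp
    · exact ⟨[], rfl⟩
  | cons c rest ih =>
    by_cases hc : c = '.'
    · subst hc
      right
      refine ⟨0, ?_, ?_, ?_⟩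
      · rw [PySem.Chars.find, PySem.Chars.find.go]; simp [List.isPrefixOf]
      · have := pvSp_ne_nil rest
        cases hsp : pvSp rest with
        | nil => exact absurd hsp this
        | cons a as => simp [pvSp, hsp]
      · simp [pvSp]
    · have hstep : PySem.Chars.find (c :: rest) ['.'] = PySem.Chars.find.go ['.'] rest 1 := by
        rw [PySem.Chars.find, PySem.Chars.find.go]
        have hpre : ['.'].isPrefixOf (c :: rest) = false := by
          simp [List.isPrefixOf]; exact fun e => hc e.symm
        simp [hpre]
      rcases ih with ⟨hf, a, hsp⟩ | ⟨k, hf, hlen, hhead⟩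
      · left
        constructor
        · rw [hstep, pvFind_go_shift rest 1]
          rw [PySem.Chars.find] at hf
          simp [hf]
        · exact ⟨c :: a, by simp [pvSp, hc, hsp, List.modifyHead]⟩
      · right
        refine ⟨k + 1, ?_, ?_, ?_⟩
        · rw [hstep, pvFind_go_shift rest 1]
          rw [PySem.Chars.find] at hf
          rw [hf]
          have : ((k : Int)) ≠ -1 := by omega
          simp only [if_neg this]; push_cast; ring
        · simpa [pvSp, hc, List.length_modifyHead] using hlen
        · cases hsp : pvSp rest with
          | nil => exact absurd hsp (pvSp_ne_nil rest)
          | cons a as =>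
            rw [hsp] at hhead
            simp only [List.head?_cons, Option.some.injEq] at hhead
            simp [pvSp, hc, hsp, List.modifyHead, hhead]

-- per-key bridge: A's max step crosses 10 iff it already had, or the key is a hit
theorem pvKey (m : Int) (key : String) :
    decide (pvAStep m key ≥ 10) = (decide (m ≥ 10) || pvHit key) := by
  unfold pvAStep pvHit
  cases hg : (PySem.Str.startswith key "backbone.layers." && PySem.Str.endswith key "conv.weight") with
  | false => simp
  | true =>
    simp only [Bool.not_true, Bool.false_eq_true, if_false, if_true]
    have hpref : "backbone.layers.".toList <+: key.toList := by
      have := hg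
      rw [Bool.and_eq_true] at this
      have h1 := this.1
      rw [PySem.Str.startswith_eq, PySem.Chars.startswith] at h1
      exact List.isPrefixOf_iff_prefix.mp h1
    have hkey : key.toList = "backbone.layers.".toList ++ key.toList.drop 16 := by
      obtain ⟨t, ht⟩ := hpref
      rw [← ht]; simp
    have hparts : (PySem.Str.split? key ".").getD []
        = "backbone" :: "layers" :: (pvSp (key.toList.drop 16)).map String.ofList := by
      rw [PySem.Str.split?]
      show (Option.map _ (PySem.Chars.split? key.toList ['.'])).getD [] = _
      rw [PySem.Chars.split?]
      simp only [List.isEmpty_cons, Bool.false_eq_true, if_false, Option.map_some, Option.getD_some]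
      rw [pvSplitOn_eq]
      conv_lhs => rw [hkey]
      rw [pvSp_pre]
      rfl
    have hrest : (PySem.Str.slice key (some 16) none).toList = key.toList.drop 16 := by
      rw [PySem.Str.toList_slice, PySem.Chars.slice_eq_listSlice,
        PySem.List.slice_from _ (by norm_num : (0:Int) ≤ 16)]
      rfl
    have hdot : PySem.Str.find (PySem.Str.slice key (some 16) none) "."
        = PySem.Chars.find (key.toList.drop 16) ['.'] := by
      rw [PySem.Str.find_eq, hrest]; rfl
    rw [hparts, hdot]
    rcases pvSp_find (key.toList.drop 16) with ⟨hf, a, hsp⟩ | ⟨k, hf, hlen, hhead⟩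
    · rw [hf, hsp]
      simp
    · have hne : PySem.Chars.find (key.toList.drop 16) ['.'] ≠ -1 := by rw [hf]; omega
      rw [hf]
      have hlen4 : ¬ ("backbone" :: "layers" :: (pvSp (key.toList.drop 16)).map String.ofList).length < 4 := by
        simp only [List.length_cons, List.length_map]; omega
      rw [if_neg hlen4, if_pos (by omega : (k : Int) ≠ -1)]
      have hidx : ("backbone" :: "layers" :: (pvSp (key.toList.drop 16)).map String.ofList)[2]?
          = some (String.ofList ((key.toList.drop 16).take k)) := by
        show ((pvSp (key.toList.drop 16)).map String.ofList)[0]? = _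
        rw [← List.head?_eq_getElem?, List.head?_map, hhead]
        rfl
      rw [hidx]
      have h1 : (PySem.Str.slice (PySem.Str.slice key (some 16) none) none (some (k : Int))).toList
          = (key.toList.drop 16).take k := by
        rw [PySem.Str.toList_slice, PySem.Chars.slice_eq_listSlice, hrest,
          PySem.List.slice_to _ (by omega : (0:Int) ≤ (k : Int))]
        simp
      have h2 : some (String.ofList ((key.toList.drop 16).take k)) >>= PySem.Int.ofStr?
          = PySem.Int.ofChars? ((key.toList.drop 16).take k) := by
        simp [PySem.Int.ofStr?]
      have h3 : PySem.Int.ofStr? (PySem.Str.slice (PySem.Str.slice key (some 16) none) none (some (k : Int)))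
          = PySem.Int.ofChars? ((key.toList.drop 16).take k) := by
        simp only [PySem.Int.ofStr?]
        rw [h1]
      rcases hof : PySem.Int.ofChars? ((key.toList.drop 16).take k) with _ | idx
      · simp only [h2, h3, hof]
        simp
      · simp only [h2, h3, hof]
        rw [Bool.eq_iff_iff]
        simp only [Bool.or_eq_true, decide_eq_true_eq]
        split_ifs <;> omega

theorem pvFold (l : List (String × List Int)) (m : Int) :
    decide (l.foldl (fun m p => pvAStep m p.1) m ≥ 10)
      = (decide (m ≥ 10) || infer_extra_block_py_alt l) := by
  induction l generalizing m with
  | nil => simp [infer_extra_block_py_alt]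
  | cons p rest ih =>
    simp only [List.foldl_cons]
    refine (ih (pvAStep m p.1)).trans ?_
    rw [pvKey]
    show _ = (_ || (if pvHit p.1 then true else infer_extra_block_py_alt rest))
    cases h : pvHit p.1 <;> simp

-- ===== VERDICT (by name: the statement is the Claim_ definition above) =====
theorem infer_extra_block_py_spec : Claim_equal_infer_extra_block_py := by
  intro sd _
  unfold Spec_infer_extra_block_py infer_extra_block_py
  simpa using pvFold sd (-1)
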